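-- pv_equiv track=rewrite | github.com/Aleksey-Danchin/Daito | задачи/15/9804/main.py | f
-- ===== SOURCE A (Python) =====
-- def f(A):
--     for x in range(0, 1_000_000):
--         a = x & A == 0
--         b = x & 17 == 0
--         c = x & 29 == 0
--
--         if not(c or (not b) or (not a)):
--             return False
--
--     return True
-- ===== SOURCE B (Python) =====
-- def f(A):
--     # A witness x (0 <= x < 1e6) with x&A==0, x&17==0, x&29!=0 must have a bit in
--     # {2,3} (bits 0 and 4 are forced off by x&17==0, and 29 = 17|12), and that bit
--     # must be absent from A; such an x (4 or 8) exists iff A does not contain both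
--     # bits 2 and 3.  So the loop returns True exactly when (A & 12) == 12.
--     return (A & 12) == 12
-- ===== Notes on version B (the rewrite author's own statement) =====
-- stated objective: faster
-- what changed: Replaced the fixed million-iteration search for a counterexample x with a closed-form bit test on A, derived from 29 = 17 | 12: a counterexample exists iff bit 2 or bit 3 is missing from A.
import Mathlib
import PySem

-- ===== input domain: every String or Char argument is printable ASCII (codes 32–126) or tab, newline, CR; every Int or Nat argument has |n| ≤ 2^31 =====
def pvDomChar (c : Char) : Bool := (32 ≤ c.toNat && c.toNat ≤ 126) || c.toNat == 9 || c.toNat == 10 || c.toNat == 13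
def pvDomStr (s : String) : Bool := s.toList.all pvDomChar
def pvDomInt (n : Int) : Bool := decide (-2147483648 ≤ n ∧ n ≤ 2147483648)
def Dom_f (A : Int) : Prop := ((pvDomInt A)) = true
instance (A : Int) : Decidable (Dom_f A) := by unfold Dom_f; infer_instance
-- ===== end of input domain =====

-- B replaces A's fixed scan of x in range(1_000_000) by the closed-form bit test (A & 12) == 12.

-- ===== PORT A =====
-- the for-loop with early return, literally: x counts up from 0 to 999999
def fLoop (A : Int) (x : Nat) : Bool :=
  if h : x < 1000000 then
    let a : Bool := PySem.Int.band ↑x A == 0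
    let b : Bool := PySem.Int.band ↑x 17 == 0
    let c : Bool := PySem.Int.band ↑x 29 == 0
    if !(c || !b || !a) then false
    else fLoop A (x + 1)
  else true
termination_by 1000000 - x

def f (A : Int) : Bool := fLoop A 0

-- ===== PORT B =====
def f_alt (A : Int) : Bool := PySem.Int.band A 12 == 12

-- ===== PRECONDITION & SPEC =====
def Spec_f (A : Int) (out : Bool) : Prop := out = f_alt A
instance (A : Int) (out : Bool) : Decidable (Spec_f A out) := by unfold Spec_f; infer_instance

-- ===== CLAIM (what is proved, stated in full; the proofs are below) =====
def Claim_equal_f : Prop := ∀ (A : Int), Dom_f A → Spec_f A (f A)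

-- ===== LEMMAS AND PROOFS =====

-- Python's bit i of A (infinite two's complement)
def Abit (A : Int) (i : Nat) : Bool :=
  if 0 ≤ A then A.toNat.testBit i else !((-A - 1).toNat.testBit i)

-- the loop body's early-return condition, as a proposition
def Trig (A : Int) (x : Nat) : Prop :=
  PySem.Int.band ↑x A = 0 ∧ PySem.Int.band ↑x 17 = 0 ∧ PySem.Int.band ↑x 29 ≠ 0

theorem and_bit_false {a b : Nat} (i : Nat) (h : a &&& b = 0) (hb : b.testBit i = true) :
    a.testBit i = false := by
  have := congrArg (fun n => Nat.testBit n i) h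
  simpa [Nat.testBit_and, hb] using this

theorem bit_of_and_eq {a b : Nat} (i : Nat) (h : a &&& b = b) (hb : b.testBit i = true) :
    a.testBit i = true := by
  have h2 := congrArg (fun n => Nat.testBit n i) h
  simp only [Nat.testBit_and, hb, Bool.and_true] at h2
  exact h2

theorem and_zero_of_bits {a b : Nat} (h : ∀ i, a.testBit i = true → b.testBit i = false) :
    a &&& b = 0 := by
  apply Nat.eq_of_testBit_eq
  intro i
  simp only [Nat.testBit_and, Nat.zero_testBit]
  cases hx : a.testBit i with
  | false => simp
  | true => simp [h i hx]

theorem testBit_small (n i : Nat) (hn : n < 32) (h : n.testBit i = true) : i < 5 := by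
  rcases Nat.lt_or_ge i 5 with hi | hi
  · exact hi
  · exfalso
    have h2 : n < 2 ^ i :=
      lt_of_lt_of_le hn (le_trans (by norm_num) (Nat.pow_le_pow_right (by norm_num) hi))
    simp [Nat.testBit_eq_false_of_lt h2] at h

theorem bit29 (i : Nat) (h : Nat.testBit 29 i = true) : i = 0 ∨ i = 2 ∨ i = 3 ∨ i = 4 := by
  have := testBit_small 29 i (by norm_num) h
  interval_cases i <;> revert h <;> decide

theorem bit12 (i : Nat) (h : Nat.testBit 12 i = true) : i = 2 ∨ i = 3 := by
  have := testBit_small 12 i (by norm_num) h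
  interval_cases i <;> revert h <;> decide

theorem bit4' (i : Nat) (h : Nat.testBit 4 i = true) : i = 2 := by
  have := testBit_small 4 i (by norm_num) h
  interval_cases i <;> revert h <;> decide

theorem bit8' (i : Nat) (h : Nat.testBit 8 i = true) : i = 3 := by
  have := testBit_small 8 i (by norm_num) h
  interval_cases i <;> revert h <;> decide

-- x & A == 0 in Python, characterised by bits (x the nonnegative loop counter)
theorem bandA_zero_iff (x : Nat) (A : Int) :
    PySem.Int.band ↑x A = 0 ↔ ∀ i, x.testBit i = true → Abit A i = false := by
  have hx : (0 : Int) ≤ ↑x := Int.natCast_nonneg x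
  unfold PySem.Int.band Abit
  rw [if_pos hx]
  split_ifs with hA
  · simp only [Int.toNat_natCast, Int.natCast_eq_zero]
    constructor
    · intro h i hxi
      have := congrArg (fun n => Nat.testBit n i) h
      simpa [Nat.testBit_and, hxi] using this
    · intro h
      exact and_zero_of_bits h
  · simp only [Int.toNat_natCast, Int.natCast_eq_zero]
    have hle : x &&& (-A - 1).toNat ≤ x := Nat.and_le_left
    constructor
    · intro h i hxi
      have heq : x &&& (-A - 1).toNat = x := by omega
      have h2 := congrArg (fun n => Nat.testBit n i) heq
      simp only [Nat.testBit_and, hxi, Bool.true_and] at h2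
      rw [h2]; decide
    · intro h
      have heq : x &&& (-A - 1).toNat = x := by
        apply Nat.eq_of_testBit_eq
        intro i
        simp only [Nat.testBit_and]
        cases hxi : x.testBit i with
        | false => simp
        | true =>
          have hm : (-A - 1).toNat.testBit i = true := by
            have hnotm := h i hxi
            cases hb : (-A - 1).toNat.testBit i with
            | true => rfl
            | false => rw [hb] at hnotm; exact absurd hnotm (by decide)
          rw [hm]; decide
      omega

-- A & 12 == 12 in Python, characterised by bits 2 and 3 of A
theorem bandA12_iff (A : Int) :
    PySem.Int.band A 12 = 12 ↔ (Abit A 2 = true ∧ Abit A 3 = true) := by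
  have h12p : (0 : Int) ≤ 12 := by norm_num
  unfold PySem.Int.band Abit
  by_cases hA : 0 ≤ A
  · simp only [if_pos hA, if_pos h12p]
    have ht : ((12 : Int)).toNat = 12 := rfl
    rw [ht]
    constructor
    · intro h
      have h' : A.toNat &&& 12 = 12 := by exact_mod_cast h
      exact ⟨bit_of_and_eq 2 h' (by decide), bit_of_and_eq 3 h' (by decide)⟩
    · rintro ⟨h2, h3⟩
      have h' : A.toNat &&& 12 = 12 := by
        apply Nat.eq_of_testBit_eq
        intro i
        simp only [Nat.testBit_and]
        cases h12i : Nat.testBit 12 i with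
        | false => simp
        | true =>
          rcases bit12 i h12i with rfl | rfl
          · simp [h2]
          · simp [h3]
      exact_mod_cast h'
  · simp only [if_neg hA, if_pos h12p]
    have ht : ((12 : Int)).toNat = 12 := rfl
    rw [ht]
    have hle : 12 &&& (-A - 1).toNat ≤ 12 := Nat.and_le_left
    constructor
    · intro h
      have h' : (12 - (12 &&& (-A - 1).toNat) : Nat) = (12 : Nat) := by exact_mod_cast h
      have h0 : 12 &&& (-A - 1).toNat = 0 := by omega
      have h0' : (-A - 1).toNat &&& 12 = 0 := by rw [Nat.and_comm]; exact h0
      constructor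
      · rw [and_bit_false 2 h0' (by decide)]; decide
      · rw [and_bit_false 3 h0' (by decide)]; decide
    · rintro ⟨h2, h3⟩
      have m2 : (-A - 1).toNat.testBit 2 = false := by
        rwa [Bool.not_eq_true'] at h2
      have m3 : (-A - 1).toNat.testBit 3 = false := by
        rwa [Bool.not_eq_true'] at h3
      have h0 : 12 &&& (-A - 1).toNat = 0 := by
        apply and_zero_of_bits
        intro i hi
        rcases bit12 i hi with rfl | rfl
        · exact m2
        · exact m3
      rw [h0]
      norm_num

theorem band29_natCast (x : Nat) : PySem.Int.band ↑x 29 = ↑(x &&& 29) := by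
  exact_mod_cast PySem.Int.band_natCast x 29

theorem band17_natCast (x : Nat) : PySem.Int.band ↑x 17 = ↑(x &&& 17) := by
  exact_mod_cast PySem.Int.band_natCast x 17

-- the boolean early-return condition of the loop body is exactly Trig
theorem cond_iff (A : Int) (x : Nat) :
    ((!((PySem.Int.band ↑x 29 == 0) || !(PySem.Int.band ↑x 17 == 0) ||
        !(PySem.Int.band ↑x A == 0))) = true) ↔ Trig A x := by
  simp [Trig, beq_iff_eq]
  tauto

theorem loop_true (A : Int) (H : ∀ x : Nat, ¬ Trig A x) :
    ∀ n k, 1000000 - k ≤ n → fLoop A k = true := by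
  intro n
  induction n with
  | zero =>
    intro k hk
    rw [fLoop]
    have : ¬ k < 1000000 := by omega
    simp [this]
  | succ n ih =>
    intro k hk
    rw [fLoop]
    by_cases hlt : k < 1000000
    · simp only [hlt, dif_pos]
      rw [if_neg (fun hcond => H k ((cond_iff A k).mp hcond))]
      exact ih (k + 1) (by omega)
    · simp [hlt]

theorem loop_false (A : Int) (w : Nat) (hw : w < 1000000) (ht : Trig A w) :
    ∀ n k, w - k ≤ n → k ≤ w → fLoop A k = false := by
  intro n
  induction n with
  | zero =>
    intro k hk hkw
    have hkw' : k = w := by omega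
    subst hkw'
    rw [fLoop]
    simp only [hw, dif_pos]
    rw [if_pos ((cond_iff A k).mpr ht)]
  | succ n ih =>
    intro k hk hkw
    rw [fLoop]
    have hlt : k < 1000000 := by omega
    simp only [hlt, dif_pos]
    by_cases hc : ((!((PySem.Int.band ↑k 29 == 0) || !(PySem.Int.band ↑k 17 == 0) ||
        !(PySem.Int.band ↑k A == 0))) = true)
    · rw [if_pos hc]
    · rw [if_neg hc]
      have hne : k ≠ w := fun h => hc (by rw [h]; exact (cond_iff A w).mpr ht)
      exact ih (k + 1) (by omega) (by omega)

theorem trig_pow (A : Int) (i : Nat) (x : Nat)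
    (hxbit : ∀ j, x.testBit j = true → j = i)
    (hx17 : x &&& 17 = 0) (hx29 : x &&& 29 ≠ 0)
    (hA : Abit A i = false) : Trig A x := by
  refine ⟨?_, ?_, ?_⟩
  · rw [bandA_zero_iff]
    intro j hj
    rw [hxbit j hj]
    exact hA
  · rw [band17_natCast, hx17]; rfl
  · rw [band29_natCast]
    exact fun h => hx29 (by exact_mod_cast h)

theorem f_eq_f_alt (A : Int) : f A = f_alt A := by
  unfold f f_alt
  by_cases h12 : PySem.Int.band A 12 = 12
  · obtain ⟨h2, h3⟩ := (bandA12_iff A).mp h12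
    have hT : ∀ x : Nat, ¬ Trig A x := by
      rintro x ⟨ha, hb, hc⟩
      apply hc
      rw [band29_natCast]
      have hab := (bandA_zero_iff x A).mp ha
      have hb' : x &&& 17 = 0 := by
        rw [band17_natCast] at hb
        exact_mod_cast hb
      have hx0 : x.testBit 0 = false := and_bit_false 0 hb' (by decide)
      have hx4 : x.testBit 4 = false := and_bit_false 4 hb' (by decide)
      have hx2 : x.testBit 2 = false := by
        cases h : x.testBit 2 with
        | false => rfl
        | true => rw [hab 2 h] at h2; exact absurd h2 (by simp)
      have hx3 : x.testBit 3 = false := by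
        cases h : x.testBit 3 with
        | false => rfl
        | true => rw [hab 3 h] at h3; exact absurd h3 (by simp)
      have h29 : x &&& 29 = 0 := by
        apply and_zero_of_bits
        intro i hi
        cases hb29 : Nat.testBit 29 i with
        | false => rfl
        | true =>
          rcases bit29 i hb29 with rfl | rfl | rfl | rfl <;> simp_all
      exact_mod_cast h29
    rw [loop_true A hT 1000000 0 (by omega)]
    simp [h12]
  · have hbits : Abit A 2 = false ∨ Abit A 3 = false := by
      cases c2 : Abit A 2 with
      | false => exact Or.inl rfl
      | true =>
        cases c3 : Abit A 3 with
        | false => exact Or.inr rfl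
        | true => exact absurd ((bandA12_iff A).mpr ⟨c2, c3⟩) h12
    have hw : ∃ w : Nat, w < 1000000 ∧ Trig A w := by
      rcases hbits with h | h
      · exact ⟨4, by omega, trig_pow A 2 4 bit4' (by decide) (by decide) h⟩
      · exact ⟨8, by omega, trig_pow A 3 8 bit8' (by decide) (by decide) h⟩
    obtain ⟨w, hwlt, hwt⟩ := hw
    rw [loop_false A w hwlt hwt w 0 (by omega) (by omega)]
    simp [h12]

-- ===== VERDICT (by name: the statement is the Claim_ definition above) =====
theorem f_spec : Claim_equal_f := by
  intro A _hd
  unfold Spec_f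
  exact f_eq_f_alt A
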